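-- pv_equiv track=rewrite | github.com/jjpenad/cfma-acgi-integration | src/services/data_mapper.py | _get_primary_email
-- ===== SOURCE A (Python) =====
-- from typing import Dict, List, Optional
--
-- def _get_primary_email(emails: List[Dict[str, any]]) -> str:
--     """Get the primary email address from the list"""
--     if not emails:
--         return ''
--
--     # Prefer work email, then primary, then first available
--     for email in emails:
--         if email.get('type', '').lower() == 'work':
--             return email.get('email', '')
--
--     for email in emails:
--         if email.get('type', '').lower() == 'primary':
--             return email.get('email', '')
--
--     # Return first valid email
--     for email in emails:
--         if email.get('email'):
--             return email.get('email', '')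
--
--     return ''
-- ===== SOURCE B (Python) =====
-- def _get_primary_email(emails):
--     """Get the primary email address from the list (one pass, three slots)."""
--     work = primary = first = None
--     for email in emails:
--         t = email.get('type', '').lower()
--         if t == 'work' and work is None:
--             work = email.get('email', '')
--         elif t == 'primary' and primary is None:
--             primary = email.get('email', '')
--         if first is None and email.get('email'):
--             first = email.get('email', '')
--     if work is not None:
--         return work
--     if primary is not None:
--         return primary
--     if first is not None:
--         return first
--     return ''
-- ===== Notes on version B (the rewrite author's own statement) =====
-- stated objective: simpler
-- what changed: A scans the list up to three times (work, then primary, then first truthy email) with early returns; B does a single pass maintaining three first-wins None-initialized slots and picks by priority afterwards.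
import Mathlib
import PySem

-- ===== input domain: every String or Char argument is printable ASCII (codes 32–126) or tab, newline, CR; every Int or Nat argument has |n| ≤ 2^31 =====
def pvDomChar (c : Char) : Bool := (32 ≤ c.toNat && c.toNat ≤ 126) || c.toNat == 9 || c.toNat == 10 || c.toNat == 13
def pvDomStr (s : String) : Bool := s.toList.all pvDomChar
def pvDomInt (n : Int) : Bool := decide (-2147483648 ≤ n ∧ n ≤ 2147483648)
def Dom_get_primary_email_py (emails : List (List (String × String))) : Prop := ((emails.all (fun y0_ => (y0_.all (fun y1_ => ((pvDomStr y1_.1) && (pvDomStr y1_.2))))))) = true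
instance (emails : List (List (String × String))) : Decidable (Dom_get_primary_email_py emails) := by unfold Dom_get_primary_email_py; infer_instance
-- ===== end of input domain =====

-- B replaces A's three sequential scans by one pass over the list keeping three first-wins slots (objective: simpler decomposition).


-- ===== PORT A =====
-- A: three sequential scans (work, then primary, then first truthy email), with early return.
def pvA_work : List (List (String × String)) → Option String
  | [] => none
  | e :: rest =>
    if PySem.Str.lower (PySem.Dict.getD (PySem.Dict.mk e) "type" "") == "work"
    then some (PySem.Dict.getD (PySem.Dict.mk e) "email" "")
    else pvA_work rest

def pvA_primary : List (List (String × String)) → Option String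
  | [] => none
  | e :: rest =>
    if PySem.Str.lower (PySem.Dict.getD (PySem.Dict.mk e) "type" "") == "primary"
    then some (PySem.Dict.getD (PySem.Dict.mk e) "email" "")
    else pvA_primary rest

-- `if email.get('email'):` — truthy iff the key is present with a nonempty value
-- (get? gives none when absent; getD "" makes both 'absent' and '""' falsy, exactly Python).
def pvA_first : List (List (String × String)) → Option String
  | [] => none
  | e :: rest =>
    if ((PySem.Dict.get? (PySem.Dict.mk e) "email").getD "" != "")
    then some (PySem.Dict.getD (PySem.Dict.mk e) "email" "")
    else pvA_first rest

def get_primary_email_py (emails : List (List (String × String))) : String :=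
  if emails.isEmpty then "" else
  match pvA_work emails with
  | some r => r
  | none =>
    match pvA_primary emails with
    | some r => r
    | none =>
      match pvA_first emails with
      | some r => r
      | none => ""

-- ===== PORT B =====
-- B: ONE pass keeping three first-wins slots (work, primary, first truthy), then pick by priority.
def pvB_step (st : Option String × Option String × Option String)
    (e : List (String × String)) : Option String × Option String × Option String :=
  let t := PySem.Str.lower (PySem.Dict.getD (PySem.Dict.mk e) "type" "")
  let g := PySem.Dict.getD (PySem.Dict.mk e) "email" ""
  let (w, p, f) := st
  let (w', p') :=
    if t == "work" && w.isNone then (some g, p)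
    else if t == "primary" && p.isNone then (w, some g)
    else (w, p)
  let f' := if f.isNone && ((PySem.Dict.get? (PySem.Dict.mk e) "email").getD "" != "")
            then some g else f
  (w', p', f')

def get_primary_email_py_alt (emails : List (List (String × String))) : String :=
  match emails.foldl pvB_step (none, none, none) with
  | (some w, _, _) => w
  | (none, some p, _) => p
  | (none, none, some f) => f
  | (none, none, none) => ""

-- ===== PRECONDITION & SPEC =====
def Spec_get_primary_email_py (emails : List (List (String × String))) (out : String) : Prop := out = get_primary_email_py_alt emails
instance (emails : List (List (String × String))) (out : String) : Decidable (Spec_get_primary_email_py emails out) := by unfold Spec_get_primary_email_py; infer_instance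

-- ===== CLAIM (what is proved, stated in full; the proofs are below) =====
def Claim_equal_get_primary_email_py : Prop := ∀ (emails : List (List (String × String))), Dom_get_primary_email_py emails → Spec_get_primary_email_py emails (get_primary_email_py emails)

-- ===== LEMMAS AND PROOFS =====


lemma pvB_fold_inv : ∀ (es : List (List (String × String))) (w p f : Option String),
    es.foldl pvB_step (w, p, f)
      = (w.or (pvA_work es), p.or (pvA_primary es), f.or (pvA_first es)) := by
  intro es
  induction es with
  | nil => intro w p f; simp [pvA_work, pvA_primary, pvA_first]
  | cons e rest ih =>
    intro w p f
    have hne : PySem.Str.lower (PySem.Dict.getD (PySem.Dict.mk e) "type" "") = "work" →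
        PySem.Str.lower (PySem.Dict.getD (PySem.Dict.mk e) "type" "") = "primary" → False := by
      intro h1 h2; rw [h1] at h2; exact absurd h2 (by decide)
    simp only [List.foldl_cons, pvB_step]
    cases w <;> cases p <;> cases f <;>
      simp_all [pvA_work, pvA_primary, pvA_first] <;>
      split_ifs <;> simp_all

-- ===== VERDICT (by name: the statement is the Claim_ definition above) =====
theorem get_primary_email_py_spec : Claim_equal_get_primary_email_py := by
  intro emails _
  unfold Spec_get_primary_email_py get_primary_email_py get_primary_email_py_alt
  rw [pvB_fold_inv]
  simp only [Option.none_or]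
  cases emails with
  | nil => simp [pvA_work, pvA_primary, pvA_first]
  | cons e rest =>
    simp only [List.isEmpty_cons, if_neg (by decide : ¬ false = true)]
    cases pvA_work (e :: rest) <;> cases pvA_primary (e :: rest) <;>
      cases pvA_first (e :: rest) <;> rfl
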